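-- pv_equiv track=rewrite | github.com/southking372/TeamWeaver | TeamWeaver/planner/llm_planner_bak/procedure/perception_connector_bak.py | _has_shared_objects_in_description
-- ===== SOURCE A (Python) =====
-- from typing import Dict, List, Any, Optional, Tuple, Union, TYPE_CHECKING
--
-- def _has_shared_objects_in_description(nav_task: Dict[str, Any], place_task: Dict[str, Any]) -> bool:
--     """判断Navigate和Place任务是否涉及相同的物品"""
--     nav_description = nav_task.get('description', '').lower()
--     place_description = place_task.get('description', '').lower()
--
--     # 提取可能的物品名称（常见物品关键词）
--     object_keywords = ['toy', 'food', 'truck', 'box', 'cup', 'plate', 'bottle', 'book', 'pen', 'key']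
--
--     nav_objects = set()
--     place_objects = set()
--
--     for keyword in object_keywords:
--         if keyword in nav_description:
--             nav_objects.add(keyword)
--         if keyword in place_description:
--             place_objects.add(keyword)
--
--     # 也检查任务目标中的物品名称
--     nav_target_words = set(nav_task.get('target', '').replace('_', ' ').lower().split())
--     place_target_words = set(place_task.get('target', '').replace('_', ' ').lower().split())
--
--     for keyword in object_keywords:
--         if keyword in nav_target_words:
--             nav_objects.add(keyword)
--         if keyword in place_target_words:
--             place_objects.add(keyword)
--
--     # 如果有共同的物品关键词，认为相关
--     shared_objects = nav_objects.intersection(place_objects)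
--     return len(shared_objects) > 0
-- ===== SOURCE B (Python) =====
-- def _has_shared_objects_in_description(nav_task, place_task):
--     """判断Navigate和Place任务是否涉及相同的物品"""
--     keywords = frozenset(['toy', 'food', 'truck', 'box', 'cup', 'plate', 'bottle', 'book', 'pen', 'key'])
--
--     def mentioned(task):
--         # scan the lowered description once, testing each window of keyword length
--         # (all keywords have length 3..6) against the keyword hash set
--         found = set()
--         text = task.get('description', '').lower()
--         for i in range(len(text)):
--             for j in (3, 4, 5, 6):
--                 sub = text[i:i+j]
--                 if sub in keywords:
--                     found.add(sub)
--         for w in task.get('target', '').replace('_', ' ').lower().split():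
--             if w in keywords:
--                 found.add(w)
--         return found
--
--     return not mentioned(nav_task).isdisjoint(mentioned(place_task))
-- ===== Notes on version B (the rewrite author's own statement) =====
-- stated objective: alternative
-- what changed: Instead of iterating the keyword list and running a substring search per keyword, B scans each lowered description once position by position, testing every length-3..6 window against a keyword hash set (plus target words against the same set), and finishes with a set-disjointness test instead of building an intersection.
import Mathlib
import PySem

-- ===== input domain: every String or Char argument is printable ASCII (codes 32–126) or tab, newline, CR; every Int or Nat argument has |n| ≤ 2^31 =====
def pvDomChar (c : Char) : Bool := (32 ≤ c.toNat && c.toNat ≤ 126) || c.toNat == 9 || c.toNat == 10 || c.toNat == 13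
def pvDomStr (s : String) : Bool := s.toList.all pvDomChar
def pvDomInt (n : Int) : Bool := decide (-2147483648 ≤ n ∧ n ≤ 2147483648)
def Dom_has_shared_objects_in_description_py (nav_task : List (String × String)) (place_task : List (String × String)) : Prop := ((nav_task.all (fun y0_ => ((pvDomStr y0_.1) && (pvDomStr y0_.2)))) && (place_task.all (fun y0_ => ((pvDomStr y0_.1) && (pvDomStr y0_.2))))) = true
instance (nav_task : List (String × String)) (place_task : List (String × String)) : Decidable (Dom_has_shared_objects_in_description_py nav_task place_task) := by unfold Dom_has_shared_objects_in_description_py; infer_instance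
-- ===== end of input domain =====

-- B inverts A's traversal: instead of iterating the 10 keywords and substring-searching each
-- description, B scans each lowered description once, testing every length-3..6 window (all
-- keyword lengths) against a keyword hash set, and ends with a disjointness test (objective: alternative).

-- ===== PORT A =====
def pvKeywords : List String :=
  ["toy", "food", "truck", "box", "cup", "plate", "bottle", "book", "pen", "key"]

def has_shared_objects_in_description_py (nav_task : List (String × String)) (place_task : List (String × String)) : Bool :=
  let nav_description := PySem.Str.lower (PySem.Dict.getD ⟨nav_task⟩ "description" "")
  let place_description := PySem.Str.lower (PySem.Dict.getD ⟨place_task⟩ "description" "")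
  let object_keywords := pvKeywords
  -- first loop: collect keywords occurring in the descriptions
  let st1 : PySem.Set String × PySem.Set String :=
    object_keywords.foldl (fun st keyword =>
      let st := if PySem.Str.isIn keyword nav_description then (PySem.Set.add st.1 keyword, st.2) else st
      if PySem.Str.isIn keyword place_description then (st.1, PySem.Set.add st.2 keyword) else st)
      (PySem.Set.empty, PySem.Set.empty)
  let nav_target_words : PySem.Set String :=
    PySem.Set.ofList (PySem.Str.split₀ (PySem.Str.lower (PySem.Str.replace (PySem.Dict.getD ⟨nav_task⟩ "target" "") "_" " ")))
  let place_target_words : PySem.Set String :=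
    PySem.Set.ofList (PySem.Str.split₀ (PySem.Str.lower (PySem.Str.replace (PySem.Dict.getD ⟨place_task⟩ "target" "") "_" " ")))
  -- second loop: add keywords occurring among the target words
  let st2 : PySem.Set String × PySem.Set String :=
    object_keywords.foldl (fun st keyword =>
      let st := if PySem.Set.contains nav_target_words keyword then (PySem.Set.add st.1 keyword, st.2) else st
      if PySem.Set.contains place_target_words keyword then (st.1, PySem.Set.add st.2 keyword) else st)
      st1
  let shared_objects := PySem.Set.inter st2.1 st2.2
  decide (PySem.Set.len shared_objects > 0)

-- ===== PORT B =====
def pvKeySet : PySem.Set String := PySem.Set.ofList pvKeywords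

-- Source B's 'mentioned': one pass over the lowered description, every window of length 3..6
-- checked against the keyword set, then the target words against the same set
def pvMentioned (task : List (String × String)) : PySem.Set String :=
  let text := PySem.Str.lower (PySem.Dict.getD ⟨task⟩ "description" "")
  let found : PySem.Set String :=
    (PySem.List.pyRange 0 (PySem.Str.len text)).foldl (fun found i =>
      ([3, 4, 5, 6] : List Int).foldl (fun found j =>
        let sub := PySem.Str.slice text (some i) (some (i + j))
        if PySem.Set.contains pvKeySet sub then PySem.Set.add found sub else found) found)
      PySem.Set.empty
  (PySem.Str.split₀ (PySem.Str.lower (PySem.Str.replace (PySem.Dict.getD ⟨task⟩ "target" "") "_" " "))).foldl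
    (fun found w => if PySem.Set.contains pvKeySet w then PySem.Set.add found w else found) found

def has_shared_objects_in_description_py_alt (nav_task : List (String × String)) (place_task : List (String × String)) : Bool :=
  ! PySem.Set.isdisjoint (pvMentioned nav_task) (pvMentioned place_task)

-- ===== PRECONDITION & SPEC =====
def Spec_has_shared_objects_in_description_py (nav_task : List (String × String)) (place_task : List (String × String)) (out : Bool) : Prop := out = has_shared_objects_in_description_py_alt nav_task place_task
instance (nav_task : List (String × String)) (place_task : List (String × String)) (out : Bool) : Decidable (Spec_has_shared_objects_in_description_py nav_task place_task out) := by unfold Spec_has_shared_objects_in_description_py; infer_instance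

-- ===== CLAIM (what is proved, stated in full; the proofs are below) =====
def Claim_equal_has_shared_objects_in_description_py : Prop := ∀ (nav_task : List (String × String)) (place_task : List (String × String)), Dom_has_shared_objects_in_description_py nav_task place_task → Spec_has_shared_objects_in_description_py nav_task place_task (has_shared_objects_in_description_py nav_task place_task)

-- ===== LEMMAS AND PROOFS =====

theorem pv_mem_add_if (s : PySem.Set String) (a x : String) (b : Bool) :
    x ∈ (if b = true then PySem.Set.add s a else s) ↔ x ∈ s ∨ (x = a ∧ b = true) := by
  cases b <;> simp [PySem.Set.mem_add s a x]

-- membership in the result of one of A's pair-building loops, for both components at once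
theorem pv_mem_fold (f g : String → Bool) (l : List String) (s : PySem.Set String × PySem.Set String) (x : String) :
    (x ∈ (l.foldl (fun st keyword =>
        let st := if f keyword then (PySem.Set.add st.1 keyword, st.2) else st
        if g keyword then (st.1, PySem.Set.add st.2 keyword) else st) s).1
      ↔ x ∈ s.1 ∨ (x ∈ l ∧ f x = true)) ∧
    (x ∈ (l.foldl (fun st keyword =>
        let st := if f keyword then (PySem.Set.add st.1 keyword, st.2) else st
        if g keyword then (st.1, PySem.Set.add st.2 keyword) else st) s).2
      ↔ x ∈ s.2 ∨ (x ∈ l ∧ g x = true)) := by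
  induction l generalizing s with
  | nil => simp
  | cons a l ih =>
    have hfst : ((let st := if f a = true then (PySem.Set.add s.1 a, s.2) else s;
        if g a = true then (st.1, PySem.Set.add st.2 a) else st)).1
        = if f a = true then PySem.Set.add s.1 a else s.1 := by
      by_cases hf : f a = true <;> by_cases hg : g a = true <;> simp [hf, hg]
    have hsnd : ((let st := if f a = true then (PySem.Set.add s.1 a, s.2) else s;
        if g a = true then (st.1, PySem.Set.add st.2 a) else st)).2
        = if g a = true then PySem.Set.add s.2 a else s.2 := by
      by_cases hf : f a = true <;> by_cases hg : g a = true <;> simp [hf, hg]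
    simp only [List.foldl_cons]
    refine ⟨?_, ?_⟩
    · rw [(ih _).1, hfst, pv_mem_add_if, List.mem_cons]
      constructor
      · rintro ((h | ⟨rfl, hfa⟩) | ⟨hl, hfx⟩)
        · exact Or.inl h
        · exact Or.inr ⟨Or.inl rfl, hfa⟩
        · exact Or.inr ⟨Or.inr hl, hfx⟩
      · rintro (h | ⟨(rfl | hl), hfx⟩)
        · exact Or.inl (Or.inl h)
        · exact Or.inl (Or.inr ⟨rfl, hfx⟩)
        · exact Or.inr ⟨hl, hfx⟩
    · rw [(ih _).2, hsnd, pv_mem_add_if, List.mem_cons]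
      constructor
      · rintro ((h | ⟨rfl, hga⟩) | ⟨hl, hgx⟩)
        · exact Or.inl h
        · exact Or.inr ⟨Or.inl rfl, hga⟩
        · exact Or.inr ⟨Or.inr hl, hgx⟩
      · rintro (h | ⟨(rfl | hl), hgx⟩)
        · exact Or.inl (Or.inl h)
        · exact Or.inl (Or.inr ⟨rfl, hgx⟩)
        · exact Or.inr ⟨hl, hgx⟩

-- nonemptiness of the intersection of two PySem sets
theorem pv_len_inter_pos (s t : PySem.Set String) :
    PySem.Set.len (PySem.Set.inter s t) > 0 ↔ ∃ x, x ∈ s ∧ x ∈ t := by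
  simp only [PySem.Set.len, PySem.Set.inter, gt_iff_lt, Int.natCast_pos, List.length_pos_iff,
    ne_eq]
  constructor
  · intro h
    obtain ⟨x, hx⟩ := List.exists_mem_of_ne_nil _ h
    obtain ⟨h1, h2⟩ := List.mem_filter.mp hx
    exact ⟨x, h1, by simpa [PySem.Set.contains, List.contains_iff_mem] using h2⟩
  · rintro ⟨x, h1, h2⟩ hnil
    have hx : x ∈ List.filter (fun x => PySem.Set.contains t x) s :=
      List.mem_filter.mpr ⟨h1, by simpa [PySem.Set.contains, List.contains_iff_mem] using h2⟩
    rw [hnil] at hx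
    exact List.not_mem_nil hx

theorem pv_set_contains_ofList (ws : List String) (x : String) :
    PySem.Set.contains (PySem.Set.ofList ws) x = true ↔ x ∈ ws := by
  simp only [PySem.Set.contains, List.contains_iff_mem, PySem.Set.mem_ofList]

-- generic membership characterisation of a set-accumulating foldl
theorem pv_mem_foldl_iff {α : Type} (step : PySem.Set String → α → PySem.Set String)
    (Q : α → String → Prop)
    (h : ∀ s e x, x ∈ step s e ↔ x ∈ s ∨ Q e x) :
    ∀ (l : List α) (s0 : PySem.Set String) (x : String),
      x ∈ l.foldl step s0 ↔ x ∈ s0 ∨ ∃ e ∈ l, Q e x := by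
  intro l
  induction l with
  | nil => simp
  | cons a l ih =>
    intro s0 x
    rw [List.foldl_cons, ih, h]
    constructor
    · rintro ((h1 | h1) | ⟨e, he, hq⟩)
      · exact Or.inl h1
      · exact Or.inr ⟨a, List.mem_cons_self, h1⟩
      · exact Or.inr ⟨e, List.mem_cons_of_mem _ he, hq⟩
    · rintro (h1 | ⟨e, he, hq⟩)
      · exact Or.inl (Or.inl h1)
      · rcases List.mem_cons.mp he with rfl | he
        · exact Or.inl (Or.inr hq)
        · exact Or.inr ⟨e, he, hq⟩

-- some window of length 3..6 starting inside the text equals keyword x  ⟺  x is a substring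
theorem pv_window_iff (t : String) (x : String) (hx : x ∈ pvKeywords) :
    (∃ i ∈ PySem.List.pyRange 0 (PySem.Str.len t), ∃ j ∈ ([3, 4, 5, 6] : List Int),
        PySem.Str.slice t (some i) (some (i + j)) = x)
      ↔ PySem.Str.isIn x t = true := by
  rw [PySem.Str.isIn_iff_infix]
  constructor
  · rintro ⟨i, hi, j, hj, heq⟩
    obtain ⟨h0i, _⟩ := PySem.List.mem_pyRange_one.mp hi
    have h0j : (0 : Int) ≤ j := by fin_cases hj <;> decide
    have hlist : PySem.List.slice t.toList (some i) (some (i + j)) = x.toList := by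
      have := congrArg String.toList heq
      rwa [PySem.Str.toList_slice, PySem.Chars.slice_eq_listSlice] at this
    rw [PySem.List.slice_toNat t.toList h0i (by omega)] at hlist
    rw [List.infix_iff_prefix_suffix]
    exact ⟨t.toList.drop i.toNat, hlist ▸ List.take_prefix _ _, List.drop_suffix _ _⟩
  · intro hinf
    have hne : x.toList ≠ [] := by fin_cases hx <;> decide
    have hisIn : PySem.Chars.isIn x.toList t.toList = true :=
      (PySem.Chars.isIn_iff_infix _ _).mpr hinf
    obtain ⟨i, hpre⟩ := (PySem.Chars.exists_prefix_drop_iff_isIn x.toList t.toList).mpr hisIn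
    have hdropne : t.toList.drop i ≠ [] := by
      intro hnil
      rw [hnil, List.prefix_nil] at hpre
      exact hne hpre
    have hilt : i < t.toList.length := by
      by_contra hge
      exact hdropne (List.drop_eq_nil_of_le (by omega))
    have hlen : (x.toList.length : Int) ∈ ([3, 4, 5, 6] : List Int) := by
      fin_cases hx <;> decide
    refine ⟨(i : Int), ?_, (x.toList.length : Int), hlen, ?_⟩
    · rw [PySem.List.mem_pyRange_one, PySem.Str.len_eq]
      omega
    · apply String.toList_inj.mp
      rw [PySem.Str.toList_slice, PySem.Chars.slice_eq_listSlice,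
        PySem.List.slice_toNat t.toList (by omega) (by omega)]
      obtain ⟨r, hr⟩ := hpre
      have htoNat : ((i : Int) + (x.toList.length : Int)).toNat - (i : Int).toNat
          = x.toList.length := by omega
      rw [htoNat, Int.toNat_natCast, ← hr, List.take_left]

-- membership in Source B's 'mentioned' set
theorem pv_mem_mentioned (task : List (String × String)) (x : String) :
    x ∈ pvMentioned task ↔ x ∈ pvKeywords ∧
      (PySem.Str.isIn x (PySem.Str.lower (PySem.Dict.getD ⟨task⟩ "description" "")) = true ∨
       x ∈ PySem.Str.split₀ (PySem.Str.lower (PySem.Str.replace (PySem.Dict.getD ⟨task⟩ "target" "") "_" " "))) := by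
  unfold pvMentioned
  simp only []
  set text := PySem.Str.lower (PySem.Dict.getD ⟨task⟩ "description" "") with htext
  set words := PySem.Str.split₀ (PySem.Str.lower (PySem.Str.replace (PySem.Dict.getD ⟨task⟩ "target" "") "_" " ")) with hwords
  have hword_step : ∀ (s : PySem.Set String) (w : String) (y : String),
      y ∈ (if PySem.Set.contains pvKeySet w = true then PySem.Set.add s w else s)
        ↔ y ∈ s ∨ (y = w ∧ PySem.Set.contains pvKeySet w = true) := by
    intro s w y; exact pv_mem_add_if s w y _
  have hinner : ∀ (s : PySem.Set String) (i : Int) (y : String),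
      y ∈ ([3, 4, 5, 6] : List Int).foldl (fun found j =>
          let sub := PySem.Str.slice text (some i) (some (i + j))
          if PySem.Set.contains pvKeySet sub then PySem.Set.add found sub else found) s
        ↔ y ∈ s ∨ ∃ j ∈ ([3, 4, 5, 6] : List Int),
            y = PySem.Str.slice text (some i) (some (i + j)) ∧
            PySem.Set.contains pvKeySet (PySem.Str.slice text (some i) (some (i + j))) = true := by
    intro s i y
    exact pv_mem_foldl_iff
      (fun found j =>
        let sub := PySem.Str.slice text (some i) (some (i + j))
        if PySem.Set.contains pvKeySet sub then PySem.Set.add found sub else found)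
      (fun j y => y = PySem.Str.slice text (some i) (some (i + j)) ∧
          PySem.Set.contains pvKeySet (PySem.Str.slice text (some i) (some (i + j))) = true)
      (fun s j y => pv_mem_add_if s _ y _) [3, 4, 5, 6] s y
  rw [pv_mem_foldl_iff _ _ hword_step,
    pv_mem_foldl_iff _
      (fun i y => ∃ j ∈ ([3, 4, 5, 6] : List Int),
          y = PySem.Str.slice text (some i) (some (i + j)) ∧
          PySem.Set.contains pvKeySet (PySem.Str.slice text (some i) (some (i + j))) = true)
      (fun s i y => hinner s i y)]
  simp only [PySem.Set.empty, List.not_mem_nil, false_or]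
  constructor
  · rintro (⟨i, hi, j, hj, rfl, hc⟩ | ⟨w, hw, rfl, hc⟩)
    · have hk := (pv_set_contains_ofList pvKeywords _).mp hc
      exact ⟨hk, Or.inl ((pv_window_iff text _ hk).mp ⟨i, hi, j, hj, rfl⟩)⟩
    · exact ⟨(pv_set_contains_ofList pvKeywords _).mp hc, Or.inr hw⟩
  · rintro ⟨hk, hin | hw⟩
    · obtain ⟨i, hi, j, hj, heq⟩ := (pv_window_iff text x hk).mpr hin
      exact Or.inl ⟨i, hi, j, hj, heq.symm, heq ▸ (pv_set_contains_ofList pvKeywords x).mpr hk⟩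
    · exact Or.inr ⟨x, hw, rfl, (pv_set_contains_ofList pvKeywords x).mpr hk⟩

theorem has_shared_objects_in_description_py_eq (nav_task place_task : List (String × String)) :
    has_shared_objects_in_description_py nav_task place_task =
      has_shared_objects_in_description_py_alt nav_task place_task := by
  unfold has_shared_objects_in_description_py has_shared_objects_in_description_py_alt
  rw [Bool.eq_iff_iff, decide_eq_true_iff, pv_len_inter_pos, Bool.not_eq_true',
    ← Bool.not_eq_true, PySem.Set.isdisjoint_iff]
  constructor
  · rintro ⟨x, hx1, hx2⟩
    rw [(pv_mem_fold _ _ _ _ x).1, (pv_mem_fold _ _ _ _ x).1] at hx1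
    rw [(pv_mem_fold _ _ _ _ x).2, (pv_mem_fold _ _ _ _ x).2] at hx2
    simp only [PySem.Set.empty, List.not_mem_nil, false_or, pv_set_contains_ofList] at hx1 hx2
    intro hdis
    refine absurd ?_ (hdis x ?_)
    · rw [pv_mem_mentioned]
      rcases hx2 with ⟨hm, h⟩ | ⟨hm, h⟩
      · exact ⟨hm, Or.inl h⟩
      · exact ⟨hm, Or.inr h⟩
    · rw [pv_mem_mentioned]
      rcases hx1 with ⟨hm, h⟩ | ⟨hm, h⟩
      · exact ⟨hm, Or.inl h⟩
      · exact ⟨hm, Or.inr h⟩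
  · intro hdis
    push Not at hdis
    obtain ⟨x, hx1, hx2⟩ := hdis
    rw [pv_mem_mentioned] at hx1 hx2
    obtain ⟨hk, hn⟩ := hx1
    obtain ⟨_, hp⟩ := hx2
    refine ⟨x, ?_, ?_⟩
    · rw [(pv_mem_fold _ _ _ _ x).1, (pv_mem_fold _ _ _ _ x).1]
      rcases hn with h | h
      · exact Or.inl (Or.inr ⟨hk, h⟩)
      · exact Or.inr ⟨hk, (pv_set_contains_ofList _ x).mpr h⟩
    · rw [(pv_mem_fold _ _ _ _ x).2, (pv_mem_fold _ _ _ _ x).2]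
      rcases hp with h | h
      · exact Or.inl (Or.inr ⟨hk, h⟩)
      · exact Or.inr ⟨hk, (pv_set_contains_ofList _ x).mpr h⟩

-- ===== VERDICT (by name: the statement is the Claim_ definition above) =====
theorem has_shared_objects_in_description_py_spec : Claim_equal_has_shared_objects_in_description_py := by
  intro nav_task place_task _
  unfold Spec_has_shared_objects_in_description_py
  exact has_shared_objects_in_description_py_eq nav_task place_task
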